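-- pv_equiv track=rewrite | github.com/denistouch/prefix_replacer | replace.py | combine_errors
-- ===== SOURCE A (Python) =====
-- def combine_errors(errors: list) -> dict:
--     errors_hash = {}
--     for error in errors:
--         file = error['file']
--         reason = str(error['reason'])
--         if reason not in errors_hash:
--             errors_hash[reason] = []
--         errors_hash[reason].append(file)
--
--     return errors_hash
-- ===== SOURCE B (Python) =====
-- def combine_errors(errors: list) -> dict:
--     reasons = []
--     for error in errors:
--         r = str(error['reason'])
--         if r not in reasons:
--             reasons.append(r)
--     return {r: [e['file'] for e in errors if str(e['reason']) == r]
--             for r in reasons}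
-- ===== Notes on version B (the rewrite author's own statement) =====
-- stated objective: alternative
-- what changed: Instead of building the dict incrementally with a membership test and append per element, B first collects the distinct reasons in first-appearance order and then builds each group in one dict comprehension by filtering the input per reason.
import Mathlib
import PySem

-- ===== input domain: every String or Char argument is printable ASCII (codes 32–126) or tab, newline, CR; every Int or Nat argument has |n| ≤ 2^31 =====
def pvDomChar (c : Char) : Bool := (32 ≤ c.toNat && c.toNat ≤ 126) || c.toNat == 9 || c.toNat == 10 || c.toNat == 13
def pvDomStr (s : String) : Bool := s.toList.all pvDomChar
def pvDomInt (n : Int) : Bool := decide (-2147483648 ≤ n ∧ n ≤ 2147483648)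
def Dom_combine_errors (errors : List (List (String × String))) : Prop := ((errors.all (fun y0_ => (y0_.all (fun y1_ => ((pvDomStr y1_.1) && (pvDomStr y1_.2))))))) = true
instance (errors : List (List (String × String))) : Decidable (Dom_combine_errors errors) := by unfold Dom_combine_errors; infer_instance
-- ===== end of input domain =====

-- B builds the distinct reasons first and then each group by a per-reason filter,
-- instead of A's incremental dict accumulation; alternative decomposition, not faster.
-- ===== PORT A =====
def combine_errors (errors : List (List (String × String))) : List (String × List String) :=
  (errors.foldl (fun h e =>
      let file := (PySem.Dict.mk e).getD "file" ""
      let reason := (PySem.Dict.mk e).getD "reason" ""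
      let h := if h.contains reason then h else h.insert reason []
      h.modify reason [] (fun l => l ++ [file]))
    PySem.Dict.empty).items

-- ===== PORT B =====
def combine_errors_alt (errors : List (List (String × String))) : List (String × List String) :=
  let reasons : PySem.Set String :=
    errors.foldl (fun rs e => PySem.Set.add rs ((PySem.Dict.mk e).getD "reason" "")) []
  reasons.map (fun r =>
    (r, (errors.filter (fun e => (PySem.Dict.mk e).getD "reason" "" == r)).map
          (fun e => (PySem.Dict.mk e).getD "file" "")))

-- ===== PRECONDITION & SPEC =====
-- A raises KeyError on an error dict missing 'file' or 'reason'; Pre_ requires both keys.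
def Pre_combine_errors (errors : List (List (String × String))) : Prop :=
  (errors.all (fun e => (PySem.Dict.mk e).contains "file" && (PySem.Dict.mk e).contains "reason")) = true
instance (errors : List (List (String × String))) : Decidable (Pre_combine_errors errors) := by unfold Pre_combine_errors; infer_instance
def pvWitness_combine_errors : (List (List (String × String))) :=
  [[("file", "a.py"), ("reason", "bad")], [("file", "b.py"), ("reason", "bad")]]
def Spec_combine_errors (errors : List (List (String × String))) (out : List (String × List String)) : Prop := out = combine_errors_alt errors
instance (errors : List (List (String × String))) (out : List (String × List String)) : Decidable (Spec_combine_errors errors out) := by unfold Spec_combine_errors; infer_instance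

-- ===== CLAIM (what is proved, stated in full; the proofs are below) =====
def Claim_equal_combine_errors : Prop := ∀ (errors : List (List (String × String))), Dom_combine_errors errors → Pre_combine_errors errors → Spec_combine_errors errors (combine_errors errors)

-- ===== LEMMAS AND PROOFS =====
theorem pv_step_eq (h : PySem.Dict String (List String)) (r f : String) :
    (let h' := if h.contains r then h else h.insert r ([] : List String)
     h'.modify r [] (fun l => l ++ [f])) = h.modify r [] (fun l => l ++ [f]) := by
  by_cases hc : h.contains r = true
  · simp [hc]
  · simp only [Bool.not_eq_true] at hc
    simp only [hc, Bool.false_eq_true, if_false, PySem.Dict.modify,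
      PySem.Dict.getD_insert_self, PySem.Dict.insert_insert_self,
      PySem.Dict.getD_of_not_contains h ([] : List String) hc]

theorem combine_errors_spec : Claim_equal_combine_errors := by
  intro errors _ _
  unfold Spec_combine_errors combine_errors combine_errors_alt
  -- the pair view of one error record
  set g : List (String × String) → String × String :=
    fun e => ((PySem.Dict.mk e).getD "reason" "", (PySem.Dict.mk e).getD "file" "") with hg
  -- A's loop is the canonical grouping fold over the (reason, file) pairs
  have hA : errors.foldl (fun h e =>
      let file := (PySem.Dict.mk e).getD "file" ""
      let reason := (PySem.Dict.mk e).getD "reason" ""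
      let h := if h.contains reason then h else h.insert reason []
      h.modify reason [] (fun l => l ++ [file])) PySem.Dict.empty
      = (errors.map g).foldl (fun d p => d.modify p.1 [] (fun l => l ++ [p.2])) PySem.Dict.empty := by
    rw [List.foldl_map]
    congr 1
    funext d e
    exact pv_step_eq d ((PySem.Dict.mk e).getD "reason" "") ((PySem.Dict.mk e).getD "file" "")
  rw [hA]
  set P := errors.map g with hP
  set D := P.foldl (fun d p => d.modify p.1 [] (fun l => l ++ [p.2])) PySem.Dict.empty with hD
  have hnd : D.keys.Nodup := by
    rw [hD]
    exact PySem.Dict.nodup_keys_foldl_modify_key P Prod.fst [] (fun d p => fun l => l ++ [p.2])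
      PySem.Dict.empty (by simp [PySem.Dict.keys, PySem.Dict.empty])
  have hkeys : D.keys = PySem.Set.ofList (P.map Prod.fst) := by
    rw [hD, PySem.Dict.keys_foldl_modify_key, PySem.Dict.keys_empty, PySem.Set.update_nil_left]
  have hreasons : errors.foldl (fun rs e => PySem.Set.add rs ((PySem.Dict.mk e).getD "reason" "")) []
      = PySem.Set.ofList (P.map Prod.fst) := by
    rw [hP, List.map_map, ← PySem.Set.update_map_eq_foldl_add, PySem.Set.update_nil_left]
    rfl
  have hval : ∀ r, D.getD r [] = (P.filter (fun p => p.1 == r)).map Prod.snd := by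
    intro r
    rw [hD, PySem.Dict.getD_foldl_modify_append]
    simp [PySem.Dict.getD_empty]
  rw [PySem.Dict.items_eq_map_keys D hnd [], hkeys, hreasons]
  apply List.map_congr_left
  intro r _
  refine Prod.ext rfl ?_
  show D.getD r [] = _
  rw [hval r, hP, List.filter_map, List.map_map]
  rfl
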